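-- pv_equiv track=rewrite | github.com/cirosantilli/project-euler-solvers | solvers/338.py | F_reference
-- ===== SOURCE A (Python) =====
-- def F_reference(w: int, h: int) -> int:
--     """
--     Reference implementation of F(w,h) from the problem definition,
--     using the 'd-step stairway' characterization and a set to remove duplicates.
--     This is only intended for small inputs (used in asserts).
--     """
--     if h > w:
--         w, h = h, w
--     res: set[tuple[int, int]] = set()
--
--     for d in range(1, w + 1):
--         if w % d != 0:
--             continue
--
--         # case (d+1) | h
--         if h % (d + 1) == 0:
--             a = w * (d + 1) // d
--             b = h * d // (d + 1)
--             if a < b: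
--                 a, b = b, a
--             if (a, b) != (w, h):
--                 res.add((a, b))
--
--         # case (d-1) | h (requires d>=2)
--         if d >= 2 and h % (d - 1) == 0:
--             a = w * (d - 1) // d
--             b = h * d // (d - 1)
--             if a < b:
--                 a, b = b, a
--             if (a, b) != (w, h):
--                 res.add((a, b))
--
--     return len(res)
-- ===== SOURCE B (Python) =====
-- def F_reference(w: int, h: int) -> int:
--     """
--     Same F(w,h), but in staged passes: enumerate only the actual divisors of w
--     by trial division up to sqrt(w) (O(sqrt w) instead of A's O(w) scan), build
--     the candidate pair list with a unified inner loop over e in (d+1, d-1)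
--     using q = w // d, and count the distinct pairs != (w, h) at the end.
--     """
--     if h > w:
--         w, h = h, w
--
--     divs = []
--     i = 1
--     while i * i <= w:
--         if w % i == 0:
--             divs.append(i)
--             divs.append(w // i)
--         i += 1
--
--     cands = []
--     for d in divs:
--         q = w // d
--         for e in (d + 1, d - 1):
--             if e >= 1 and h % e == 0:
--                 a = q * e
--                 b = (h // e) * d
--                 cands.append((max(a, b), min(a, b)))
--
--     return len({p for p in cands if p != (w, h)})
-- ===== Notes on version B (the rewrite author's own statement) =====
-- stated objective: faster
-- what changed: B replaces A's scan of every d in 1..w with trial division up to sqrt(w) collecting only w's divisors, unifies A's two per-divisor branches into one inner loop over e in (d+1, d-1) with simplified exact-division arithmetic (q = w//d), and deduplicates once at the end over a candidate list instead of A's incremental set insertion.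
import Mathlib
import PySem

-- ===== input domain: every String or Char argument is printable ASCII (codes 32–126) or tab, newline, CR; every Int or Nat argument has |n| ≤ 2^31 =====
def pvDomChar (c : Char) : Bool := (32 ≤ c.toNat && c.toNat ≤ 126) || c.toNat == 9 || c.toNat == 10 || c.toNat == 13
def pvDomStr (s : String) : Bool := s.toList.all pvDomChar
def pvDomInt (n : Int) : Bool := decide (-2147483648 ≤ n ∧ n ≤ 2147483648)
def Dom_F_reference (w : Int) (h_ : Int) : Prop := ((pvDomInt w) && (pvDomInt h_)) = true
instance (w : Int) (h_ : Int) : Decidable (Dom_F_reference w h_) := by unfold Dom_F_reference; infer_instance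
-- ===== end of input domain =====

-- B enumerates only the divisors of w by trial division up to sqrt(w) instead of A's
-- scan of every d in 1..w, unifies A's two branches into one inner loop over (d+1, d-1)
-- with exact-division arithmetic, and deduplicates once at the end.

-- ===== PORT A =====
-- body of A's 'for d in range(1, w+1)' loop (res is the set accumulator)
def pvStepA (w h : Int) (res : PySem.Set (Int × Int)) (d : Int) : PySem.Set (Int × Int) :=
  if PySem.Int.mod w d ≠ 0 then res
  else
    let res :=
      if PySem.Int.mod h (d + 1) = 0 then
        let a := PySem.Int.floordiv (w * (d + 1)) d
        let b := PySem.Int.floordiv (h * d) (d + 1)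
        let p := if a < b then (b, a) else (a, b)
        if p ≠ (w, h) then res.add p else res
      else res
    if d ≥ 2 ∧ PySem.Int.mod h (d - 1) = 0 then
      let a := PySem.Int.floordiv (w * (d - 1)) d
      let b := PySem.Int.floordiv (h * d) (d - 1)
      let p := if a < b then (b, a) else (a, b)
      if p ≠ (w, h) then res.add p else res
    else res

def F_reference (w : Int) (h_ : Int) : Int :=
  let wh := if h_ > w then (h_, w) else (w, h_)
  let res := (PySem.List.pyRange 1 (wh.1 + 1)).foldl (pvStepA wh.1 wh.2) PySem.Set.empty
  (res.length : Int)

-- ===== PORT B =====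
-- termination helper for the 'while i * i <= w' loop: the guard forces i ≤ w
theorem pv_i_le_w {w i : Int} (h : i * i ≤ w) : i ≤ w := by nlinarith [mul_self_nonneg (i - 1)]

-- B's 'while i * i <= w' divisor-collecting loop
def pvDivLoop (w : Int) (i : Int) : List Int :=
  if hg : i * i ≤ w then
    (if PySem.Int.mod w i = 0 then [i, PySem.Int.floordiv w i] else []) ++ pvDivLoop w (i + 1)
  else []
termination_by (w + 1 - i).toNat
decreasing_by
  have := pv_i_le_w (by assumption)
  omega

def F_reference_alt (w : Int) (h_ : Int) : Int :=
  let wh := if h_ > w then (h_, w) else (w, h_)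
  let cands := (pvDivLoop wh.1 1).foldl (fun acc d =>
    let q := PySem.Int.floordiv wh.1 d
    [d + 1, d - 1].foldl (fun acc2 e =>
      if e ≥ 1 ∧ PySem.Int.mod wh.2 e = 0 then
        let a := q * e
        let b := PySem.Int.floordiv wh.2 e * d
        acc2 ++ [(max a b, min a b)]
      else acc2) acc) []
  ((PySem.Set.ofList (cands.filter (fun p => p ≠ wh))).length : Int)

-- ===== PRECONDITION & SPEC =====
def Spec_F_reference (w : Int) (h_ : Int) (out : Int) : Prop := out = F_reference_alt w h_
instance (w : Int) (h_ : Int) (out : Int) : Decidable (Spec_F_reference w h_ out) := by unfold Spec_F_reference; infer_instance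

-- ===== CLAIM (what is proved, stated in full; the proofs are below) =====
def Claim_equal_F_reference : Prop := ∀ (w : Int) (h_ : Int), Dom_F_reference w h_ → Spec_F_reference w h_ (F_reference w h_)

-- ===== LEMMAS AND PROOFS =====

-- A's normalize-then-insert step for one candidate pair (a, b), as a 0/1-element list
def pvSel (w h a b : Int) : List (Int × Int) :=
  if (if a < b then (b, a) else (a, b)) ≠ (w, h) then [if a < b then (b, a) else (a, b)] else []

-- the (at most two) pairs A's loop body inserts for a given d
def pvPairs (w h d : Int) : List (Int × Int) :=
  (if PySem.Int.mod h (d + 1) = 0 then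
    pvSel w h (PySem.Int.floordiv (w * (d + 1)) d) (PySem.Int.floordiv (h * d) (d + 1))
  else []) ++
  (if d ≥ 2 ∧ PySem.Int.mod h (d - 1) = 0 then
    pvSel w h (PySem.Int.floordiv (w * (d - 1)) d) (PySem.Int.floordiv (h * d) (d - 1))
  else [])

-- the (at most two) pairs B's inner loop appends for a given d
def pvCandsB (w h d : Int) : List (Int × Int) :=
  (if d + 1 ≥ 1 ∧ PySem.Int.mod h (d + 1) = 0 then
    [(max (PySem.Int.floordiv w d * (d + 1)) (PySem.Int.floordiv h (d + 1) * d),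
      min (PySem.Int.floordiv w d * (d + 1)) (PySem.Int.floordiv h (d + 1) * d))]
  else []) ++
  (if d - 1 ≥ 1 ∧ PySem.Int.mod h (d - 1) = 0 then
    [(max (PySem.Int.floordiv w d * (d - 1)) (PySem.Int.floordiv h (d - 1) * d),
      min (PySem.Int.floordiv w d * (d - 1)) (PySem.Int.floordiv h (d - 1) * d))]
  else [])

theorem pvStepA_eq_update (w h : Int) (res : PySem.Set (Int × Int)) (d : Int) :
    pvStepA w h res d =
      PySem.Set.update res (if PySem.Int.mod w d = 0 then pvPairs w h d else []) := by
  unfold pvStepA pvPairs pvSel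
  by_cases hd : PySem.Int.mod w d = 0
  · rw [if_neg (by simp [hd]), if_pos hd]
    simp only [PySem.Set.update]
    split_ifs <;> simp_all [List.foldl]
  · rw [if_pos hd, if_neg hd]
    simp [PySem.Set.update]

-- the if-swap normalization is (max, min)
theorem pv_swap_eq_maxmin (a b : Int) :
    (if a < b then (b, a) else (a, b)) = (max a b, min a b) := by
  split_ifs with hab
  · simp [max_eq_right hab.le, min_eq_left hab.le]
  · simp [max_eq_left (le_of_not_gt hab), min_eq_right (le_of_not_gt hab)]

theorem pv_mem_ite_single {α : Type} [DecidableEq α] (x p q : α) :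
    x ∈ (if p ≠ q then [p] else []) ↔ x = p ∧ x ≠ q := by
  by_cases h : p = q
  · subst h; simp
  · simp only [h, ne_eq, not_false_eq_true, if_true, List.mem_singleton]
    exact ⟨fun hx => ⟨hx, hx ▸ h⟩, fun hx => hx.1⟩

theorem pv_mem_sel (w h a b : Int) (x : Int × Int) :
    x ∈ pvSel w h a b ↔ x = (max a b, min a b) ∧ x ≠ (w, h) := by
  unfold pvSel
  rw [pv_swap_eq_maxmin]
  exact pv_mem_ite_single x _ _

-- membership/nodup invariant of a fold of Set.update
theorem pv_foldl_update {α : Type} [BEq α] [LawfulBEq α] (g : Int → List α) :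
    ∀ (l : List Int) (s : PySem.Set α), s.Nodup →
      (l.foldl (fun s d => PySem.Set.update s (g d)) s).Nodup ∧
      ∀ x, x ∈ l.foldl (fun s d => PySem.Set.update s (g d)) s ↔
        x ∈ s ∨ ∃ d ∈ l, x ∈ g d := by
  intro l
  induction l with
  | nil => intro s hs; simpa using hs
  | cons a t ih =>
    intro s hs
    have h1 : (PySem.Set.update s (g a)).Nodup := PySem.Set.nodup_update s (g a) hs
    obtain ⟨hn, hm⟩ := ih (PySem.Set.update s (g a)) h1
    refine ⟨hn, fun x => ?_⟩
    rw [List.foldl_cons, hm x, PySem.Set.mem_update]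
    simp only [List.mem_cons]
    constructor
    · rintro ((hx | hx) | ⟨d, hd, hx⟩)
      · exact Or.inl hx
      · exact Or.inr ⟨a, Or.inl rfl, hx⟩
      · exact Or.inr ⟨d, Or.inr hd, hx⟩
    · rintro (hx | ⟨d, (rfl | hd), hx⟩)
      · exact Or.inl (Or.inl hx)
      · exact Or.inl (Or.inr hx)
      · exact Or.inr ⟨d, hd, hx⟩

-- every element of pvDivLoop w i (1 ≤ i) is a divisor of w in [1, w]
theorem pv_divLoop_sound (w : Int) :
    ∀ (n : Nat) (i : Int), (w + 1 - i).toNat = n → 1 ≤ i →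
      ∀ d ∈ pvDivLoop w i, 1 ≤ d ∧ d ≤ w ∧ PySem.Int.mod w d = 0 := by
  intro n
  induction n with
  | zero =>
    intro i hn hi d hd
    rw [pvDivLoop] at hd
    have : ¬ i * i ≤ w := by intro hg; have := pv_i_le_w hg; omega
    simp [this] at hd
  | succ m ih =>
    intro i hn hi d hd
    rw [pvDivLoop] at hd
    by_cases hg : i * i ≤ w
    · have hiw : i ≤ w := pv_i_le_w hg
      simp only [hg, dif_pos, List.mem_append] at hd
      rcases hd with hd | hd
      · have hw1 : 1 ≤ w := by nlinarith
        by_cases hdv : PySem.Int.mod w i = 0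
        · simp [hdv] at hd
          have hdvd : i ∣ w := (PySem.Int.mod_eq_zero_iff_dvd w i).mp hdv
          obtain ⟨k, hk⟩ := hdvd
          have hfd : PySem.Int.floordiv w i = k := by
            rw [PySem.Int.floordiv_eq_ediv_of_pos (by omega), hk,
              Int.mul_ediv_cancel_left k (by omega)]
          have hk1 : 1 ≤ k := by nlinarith
          have hkw : k ≤ w := by nlinarith
          rcases hd with rfl | rfl
          · exact ⟨hi, hiw, hdv⟩
          · refine ⟨by omega, by omega, ?_⟩
            rw [hfd, PySem.Int.mod_eq_zero_iff_dvd]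
            exact ⟨i, by linarith [hk]⟩
        · simp [hdv] at hd
      · exact ih (i + 1) (by omega) (by omega) d hd
    · simp [hg] at hd

-- every divisor j ≤ sqrt(w) contributes both j and w // j to pvDivLoop
theorem pv_divLoop_complete (w : Int) :
    ∀ (n : Nat) (i j : Int), (j - i).toNat = n → 1 ≤ i → i ≤ j → j * j ≤ w →
      PySem.Int.mod w j = 0 →
      j ∈ pvDivLoop w i ∧ PySem.Int.floordiv w j ∈ pvDivLoop w i := by
  intro n
  induction n with
  | zero =>
    intro i j hn hi hij hjw hdv
    have : i = j := by omega
    subst this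
    rw [pvDivLoop]
    simp [hjw, hdv]
  | succ m ih =>
    intro i j hn hi hij hjw hdv
    have hg : i * i ≤ w := by nlinarith
    rw [pvDivLoop]
    simp only [hg, dif_pos, List.mem_append]
    have := ih (i + 1) j (by omega) (by omega) (by omega) hjw hdv
    exact ⟨Or.inr this.1, Or.inr this.2⟩

-- d ∈ pvDivLoop w 1 ↔ d is a divisor of w in [1, w]
theorem pv_mem_divLoop (w d : Int) :
    d ∈ pvDivLoop w 1 ↔ 1 ≤ d ∧ d ≤ w ∧ PySem.Int.mod w d = 0 := by
  constructor
  · exact pv_divLoop_sound w _ 1 rfl le_rfl d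
  · rintro ⟨h1, h2, h3⟩
    have hdvd : d ∣ w := (PySem.Int.mod_eq_zero_iff_dvd w d).mp h3
    obtain ⟨k, hk⟩ := hdvd
    have hw1 : 1 ≤ w := by omega
    have hk1 : 1 ≤ k := by nlinarith
    by_cases hsq : d * d ≤ w
    · exact (pv_divLoop_complete w _ 1 d rfl le_rfl h1 hsq h3).1
    · have hkk : k * k ≤ w := by nlinarith
      have hkdv : PySem.Int.mod w k = 0 :=
        (PySem.Int.mod_eq_zero_iff_dvd w k).mpr ⟨d, by linarith [hk]⟩
      have hfd : PySem.Int.floordiv w k = d := by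
        rw [PySem.Int.floordiv_eq_ediv_of_pos (by omega), hk, mul_comm,
          Int.mul_ediv_cancel_left d (by omega)]
      have := (pv_divLoop_complete w _ 1 k rfl le_rfl hk1 hkk hkdv).2
      rwa [hfd] at this

-- exact division: floordiv (k*b) b = k for b ≠ 0
theorem pv_floordiv_mul_cancel (k b : Int) (hb : b ≠ 0) :
    PySem.Int.floordiv (k * b) b = k := by
  rcases lt_or_gt_of_ne hb with hneg | hpos
  · rw [← PySem.Int.floordiv_neg_neg (k * b) b, show -(k * b) = k * -b by ring,
      PySem.Int.floordiv_eq_ediv_of_pos (by omega), mul_comm,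
      Int.mul_ediv_cancel_left k (by omega)]
  · rw [PySem.Int.floordiv_eq_ediv_of_pos hpos, Int.mul_ediv_cancel k hb]

-- for a divisor d of w, A's pair arithmetic for offset e equals B's
theorem pv_pairs_arith (w h d e : Int) (hd : 1 ≤ d) (hdv : PySem.Int.mod w d = 0)
    (he : 1 ≤ e) (hev : PySem.Int.mod h e = 0) :
    PySem.Int.floordiv (w * e) d = PySem.Int.floordiv w d * e ∧
    PySem.Int.floordiv (h * d) e = PySem.Int.floordiv h e * d := by
  obtain ⟨q, hq⟩ := (PySem.Int.mod_eq_zero_iff_dvd w d).mp hdv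
  obtain ⟨m, hm⟩ := (PySem.Int.mod_eq_zero_iff_dvd h e).mp hev
  have hfw : PySem.Int.floordiv w d = q := by
    rw [hq, mul_comm]; exact pv_floordiv_mul_cancel q d (by omega)
  have hfh : PySem.Int.floordiv h e = m := by
    rw [hm, mul_comm]; exact pv_floordiv_mul_cancel m e (by omega)
  constructor
  · rw [hfw, hq, show d * q * e = q * e * d by ring, pv_floordiv_mul_cancel _ d (by omega)]
  · rw [hfh, hm, show e * m * d = m * d * e by ring, pv_floordiv_mul_cancel _ e (by omega)]

-- per-divisor: A's inserted pairs = B's candidates filtered by ≠ (w, h)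
theorem pv_pairs_eq (w h d : Int) (hd : 1 ≤ d) (hdv : PySem.Int.mod w d = 0) (x : Int × Int) :
    x ∈ pvPairs w h d ↔ x ∈ pvCandsB w h d ∧ x ≠ (w, h) := by
  have h1 : (d + 1 ≥ 1 ∧ PySem.Int.mod h (d + 1) = 0) ↔ PySem.Int.mod h (d + 1) = 0 :=
    ⟨fun hh => hh.2, fun hh => ⟨by omega, hh⟩⟩
  have h2 : (d - 1 ≥ 1 ∧ PySem.Int.mod h (d - 1) = 0) ↔
      (d ≥ 2 ∧ PySem.Int.mod h (d - 1) = 0) :=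
    ⟨fun hh => ⟨by omega, hh.2⟩, fun hh => ⟨by omega, hh.2⟩⟩
  unfold pvPairs pvCandsB
  rw [if_congr h1 rfl rfl, if_congr h2 rfl rfl]
  by_cases hc1 : PySem.Int.mod h (d + 1) = 0 <;>
    by_cases hc2 : d ≥ 2 ∧ PySem.Int.mod h (d - 1) = 0
  · obtain ⟨e1, e1'⟩ := pv_pairs_arith w h d (d + 1) hd hdv (by omega) hc1
    obtain ⟨e2, e2'⟩ := pv_pairs_arith w h d (d - 1) hd hdv (by omega) hc2.2
    rw [if_pos hc1, if_pos hc1, if_pos hc2, if_pos hc2]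
    simp only [List.mem_append, pv_mem_sel, List.mem_singleton]
    rw [e1, e1', e2, e2']
    tauto
  · obtain ⟨e1, e1'⟩ := pv_pairs_arith w h d (d + 1) hd hdv (by omega) hc1
    rw [if_pos hc1, if_pos hc1, if_neg hc2, if_neg hc2]
    simp only [pv_mem_sel, List.mem_singleton, List.append_nil]
    rw [e1, e1']
  · obtain ⟨e2, e2'⟩ := pv_pairs_arith w h d (d - 1) hd hdv (by omega) hc2.2
    rw [if_neg hc1, if_neg hc1, if_pos hc2, if_pos hc2]
    simp only [pv_mem_sel, List.mem_singleton, List.nil_append]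
    rw [e2, e2']
  · rw [if_neg hc1, if_neg hc1, if_neg hc2, if_neg hc2]
    simp

-- the two results have the same elements, are duplicate-free, hence the same length
theorem pv_core (wh : Int × Int) :
    ((PySem.List.pyRange 1 (wh.1 + 1)).foldl (pvStepA wh.1 wh.2) PySem.Set.empty).length =
      (PySem.Set.ofList
        (((pvDivLoop wh.1 1).foldl (fun acc d => acc ++ pvCandsB wh.1 wh.2 d) []).filter
          (fun p => p ≠ wh))).length := by
  obtain ⟨W, H⟩ := wh
  have hA : (PySem.List.pyRange 1 (W + 1)).foldl (pvStepA W H) PySem.Set.empty =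
      (PySem.List.pyRange 1 (W + 1)).foldl
        (fun s d => PySem.Set.update s (if PySem.Int.mod W d = 0 then pvPairs W H d else []))
        PySem.Set.empty := by
    congr 1; funext s d; exact pvStepA_eq_update W H s d
  rw [hA]
  obtain ⟨hnA, hmA⟩ := pv_foldl_update
    (fun d => if PySem.Int.mod W d = 0 then pvPairs W H d else [])
    (PySem.List.pyRange 1 (W + 1)) PySem.Set.empty List.nodup_nil
  have hmC : ∀ x : Int × Int,
      x ∈ (pvDivLoop W 1).foldl (fun acc d => acc ++ pvCandsB W H d) [] ↔
        ∃ d ∈ pvDivLoop W 1, x ∈ pvCandsB W H d := by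
    intro x
    rw [PySem.List.foldl_append_eq_flatMap (pvCandsB W H)]
    simp [List.mem_flatMap]
  refine List.Perm.length_eq ((List.perm_ext_iff_of_nodup hnA
    (PySem.Set.nodup_ofList _)).mpr ?_)
  intro x
  rw [hmA x, PySem.Set.mem_ofList, List.mem_filter, hmC x]
  simp only [PySem.Set.empty, List.not_mem_nil, false_or, decide_eq_true_eq, ne_eq]
  constructor
  · rintro ⟨d, hd, hx⟩
    rw [PySem.List.mem_pyRange_one] at hd
    by_cases hdv : PySem.Int.mod W d = 0
    · rw [if_pos hdv] at hx
      have hh := (pv_pairs_eq W H d hd.1 hdv x).mp hx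
      exact ⟨⟨d, (pv_mem_divLoop W d).mpr ⟨hd.1, by omega, hdv⟩, hh.1⟩, hh.2⟩
    · rw [if_neg hdv] at hx; simp at hx
  · rintro ⟨⟨d, hd, hx⟩, hne⟩
    rw [pv_mem_divLoop] at hd
    refine ⟨d, ?_, ?_⟩
    · rw [PySem.List.mem_pyRange_one]; omega
    · rw [if_pos hd.2.2]
      exact (pv_pairs_eq W H d hd.1 hd.2.2 x).mpr ⟨hx, hne⟩

-- B's nested fold is the fold appending pvCandsB
theorem pv_outer (W H : Int) (l : List Int) :
    ∀ acc : List (Int × Int),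
      l.foldl (fun acc d =>
        [d + 1, d - 1].foldl (fun acc2 e =>
          if e ≥ 1 ∧ PySem.Int.mod H e = 0 then
            acc2 ++ [(max (PySem.Int.floordiv W d * e) (PySem.Int.floordiv H e * d),
                      min (PySem.Int.floordiv W d * e) (PySem.Int.floordiv H e * d))]
          else acc2) acc) acc =
      l.foldl (fun acc d => acc ++ pvCandsB W H d) acc := by
  induction l with
  | nil => intro acc; rfl
  | cons a t ih =>
    intro acc
    rw [List.foldl_cons, List.foldl_cons, ih]
    refine congrArg (fun z => List.foldl (fun acc d => acc ++ pvCandsB W H d) z t) ?_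
    simp only [List.foldl_cons, List.foldl_nil]
    unfold pvCandsB
    split_ifs <;> simp

-- ===== VERDICT (by name: the statement is the Claim_ definition above) =====
theorem F_reference_spec : Claim_equal_F_reference := by
  intro w h_ _
  unfold Spec_F_reference F_reference F_reference_alt
  dsimp only []
  rw [pv_outer]
  exact congrArg Int.ofNat (pv_core (if h_ > w then (h_, w) else (w, h_)))
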